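-- pv_equiv track=rewrite | github.com/aam-berg/allelic_analyses | scripts/lib/split_by_allele.py | classify_assignments
-- ===== SOURCE A (Python) =====
-- def classify_assignments(assignments):
--     """
--     Given a list of allele assignments ('ref', 'alt', 'other') from one fragment
--     (one read in SE, two reads' worth in PE), return the fragment's class.
--
--     Rules:
--       No assignments at all          -> 'nosnp'
--       Only 'other' (errors)          -> 'ambiguous'
--       All informative are 'ref'      -> 'ref'
--       All informative are 'alt'      -> 'alt'
--       Mix of 'ref' and 'alt'         -> 'ambiguous'
--
--     The 'other' category includes sequencing errors and (rare) third alleles.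
--     They're filtered out before the ref/alt unanimity check.
--     """
--     if not assignments:
--         return "nosnp"
--
--     informative = [a for a in assignments if a in ("ref", "alt")]
--     if not informative:
--         return "ambiguous"
--
--     if len(set(informative)) == 1:
--         return informative[0]
--     return "ambiguous"
-- ===== SOURCE B (Python) =====
-- def classify_assignments(assignments):
--     """Single pass with two boolean flags; no filtered list or set is built."""
--     if not assignments:
--         return "nosnp"
--     has_ref = False
--     has_alt = False
--     for a in assignments:
--         if a == "ref":
--             has_ref = True
--         elif a == "alt":
--             has_alt = True
--     if has_ref and has_alt:
--         return "ambiguous"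
--     if has_ref:
--         return "ref"
--     if has_alt:
--         return "alt"
--     return "ambiguous"
-- ===== Notes on version B (the rewrite author's own statement) =====
-- stated objective: simpler
-- what changed: Replaces the filtered list plus set-cardinality check with one pass maintaining two boolean flags (has_ref/has_alt) and a final four-way decision.
import Mathlib
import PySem

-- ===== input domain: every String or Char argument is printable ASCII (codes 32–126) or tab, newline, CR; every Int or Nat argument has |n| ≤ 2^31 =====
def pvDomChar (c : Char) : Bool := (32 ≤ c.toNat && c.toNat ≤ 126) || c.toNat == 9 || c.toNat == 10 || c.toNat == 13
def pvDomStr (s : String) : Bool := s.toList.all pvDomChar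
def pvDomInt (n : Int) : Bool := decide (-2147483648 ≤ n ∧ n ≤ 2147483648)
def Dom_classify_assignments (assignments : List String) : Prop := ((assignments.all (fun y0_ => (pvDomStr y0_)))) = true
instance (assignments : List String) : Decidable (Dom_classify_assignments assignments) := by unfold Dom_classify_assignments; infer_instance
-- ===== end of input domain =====

-- B replaces A's filtered list + set-cardinality check with a single pass keeping two boolean flags (simpler decomposition, same O(n) cost).


-- ===== PORT A =====
def classify_assignments (assignments : List String) : String :=
  if assignments = [] then "nosnp"
  else
    let informative := assignments.filter (fun a => a == "ref" || a == "alt")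
    if informative = [] then "ambiguous"
    else if (PySem.Set.ofList informative).length = 1 then informative.headD ""  -- informative[0]; informative ≠ [] here
    else "ambiguous"

-- ===== PORT B =====
def classify_assignments_alt (assignments : List String) : String :=
  if assignments = [] then "nosnp"
  else
    let flags := assignments.foldl
      (fun (p : Bool × Bool) a =>
        if a == "ref" then (true, p.2)
        else if a == "alt" then (p.1, true)
        else p)
      (false, false)
    if flags.1 && flags.2 then "ambiguous"
    else if flags.1 then "ref"
    else if flags.2 then "alt"
    else "ambiguous"

-- ===== PRECONDITION & SPEC =====
def Spec_classify_assignments (assignments : List String) (out : String) : Prop := out = classify_assignments_alt assignments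
instance (assignments : List String) (out : String) : Decidable (Spec_classify_assignments assignments out) := by unfold Spec_classify_assignments; infer_instance

-- ===== CLAIM (what is proved, stated in full; the proofs are below) =====
def Claim_equal_classify_assignments : Prop := ∀ (assignments : List String), Dom_classify_assignments assignments → Spec_classify_assignments assignments (classify_assignments assignments)

-- ===== LEMMAS AND PROOFS =====

-- B's fold computes exactly (r ∨ "ref" ∈ l, b ∨ "alt" ∈ l)
theorem pv_flags_eq (l : List String) (r b : Bool) :
    l.foldl (fun (p : Bool × Bool) a =>
        if a == "ref" then (true, p.2)
        else if a == "alt" then (p.1, true)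
        else p) (r, b)
      = (r || l.contains "ref", b || l.contains "alt") := by
  induction l generalizing r b with
  | nil => simp
  | cons a t ih =>
    by_cases h1 : a = "ref"
    · have hf : (if a == "ref" then ((true : Bool), b)
          else if a == "alt" then (r, (true : Bool)) else (r, b)) = (true, b) := by
        simp [h1]
      rw [List.foldl_cons, hf, ih]; simp [h1]
    · by_cases h2 : a = "alt"
      · have hf : (if a == "ref" then ((true : Bool), b)
            else if a == "alt" then (r, (true : Bool)) else (r, b)) = (r, true) := by
          simp [h2]
        rw [List.foldl_cons, hf, ih]; simp [h1, h2]
      · have hf : (if a == "ref" then ((true : Bool), b)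
            else if a == "alt" then (r, (true : Bool)) else (r, b)) = (r, b) := by
          simp [h1, h2]
        rw [List.foldl_cons, hf, ih]; simp [Ne.symm h1, Ne.symm h2]

theorem pv_len_ne_one (l : List String) (x y : String) (hx : x ∈ l) (hy : y ∈ l)
    (hxy : x ≠ y) : l.length ≠ 1 := by
  intro h
  match l, h with
  | [a], _ =>
    simp at hx hy
    exact hxy (hx.trans hy.symm)

theorem pv_foldl_add_const (l : List String) (x : String) (h : ∀ a ∈ l, a = x) :
    l.foldl PySem.Set.add [x] = [x] := by
  induction l with
  | nil => rfl
  | cons a t ih =>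
    have ha : a = x := h a (by simp)
    subst ha
    have : PySem.Set.add [a] a = [a] := by simp [PySem.Set.add, PySem.Set.contains]
    simp only [List.foldl, this]
    exact ih (fun b hb => h b (by simp [hb]))

theorem pv_ofList_const (l : List String) (x : String) (hne : l ≠ [])
    (h : ∀ a ∈ l, a = x) : PySem.Set.ofList l = [x] := by
  match l with
  | a :: t =>
    have ha : a = x := h a (by simp)
    subst ha
    have : PySem.Set.ofList (a :: t) = t.foldl PySem.Set.add [a] := by
      simp [PySem.Set.ofList_eq_foldl, List.foldl, PySem.Set.add]
    rw [this, pv_foldl_add_const t a (fun b hb => h b (by simp [hb]))]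

theorem pv_headD_const (l : List String) (x : String) (hne : l ≠ [])
    (h : ∀ a ∈ l, a = x) : l.headD "" = x := by
  match l with
  | a :: t => exact h a (by simp)

-- ===== VERDICT (by name: the statement is the Claim_ definition above) =====
theorem classify_assignments_spec : Claim_equal_classify_assignments := by
  intro assignments _
  unfold Spec_classify_assignments classify_assignments classify_assignments_alt
  by_cases hnil : assignments = []
  · simp [hnil]
  · simp only [hnil, if_false, pv_flags_eq, Bool.false_or]
    set l := assignments.filter (fun a => a == "ref" || a == "alt") with hl
    by_cases hr : "ref" ∈ assignments
    · have hrl : "ref" ∈ l := by simp [hl, List.mem_filter, hr]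
      by_cases ha : "alt" ∈ assignments
      · -- both present → both sides "ambiguous"
        have hal : "alt" ∈ l := by simp [hl, List.mem_filter, ha]
        have hlen := pv_len_ne_one (PySem.Set.ofList l) "ref" "alt"
          (by simpa using (PySem.Set.mem_ofList l "ref").mpr hrl)
          (by simpa using (PySem.Set.mem_ofList l "alt").mpr hal) (by decide)
        have hlne : l ≠ [] := by intro h; rw [h] at hrl; simp at hrl
        simp [hlne, hlen, hr, ha]
      · -- only ref
        have hconst : ∀ a ∈ l, a = "ref" := by
          intro a hal
          rw [hl, List.mem_filter] at hal
          rcases hal with ⟨hmem, hp⟩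
          simp at hp
          rcases hp with h | h
          · exact h
          · exact absurd (h ▸ hmem) ha
        have hlne : l ≠ [] := by intro h; rw [h] at hrl; simp at hrl
        rw [pv_ofList_const l "ref" hlne hconst, pv_headD_const l "ref" hlne hconst]
        simp [hlne, hr, ha]
    · by_cases ha : "alt" ∈ assignments
      · -- only alt
        have hal : "alt" ∈ l := by simp [hl, List.mem_filter, ha]
        have hconst : ∀ a ∈ l, a = "alt" := by
          intro a hall
          rw [hl, List.mem_filter] at hall
          rcases hall with ⟨hmem, hp⟩
          simp at hp
          rcases hp with h | h
          · exact absurd (h ▸ hmem) hr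
          · exact h
        have hlne : l ≠ [] := by intro h; rw [h] at hal; simp at hal
        rw [pv_ofList_const l "alt" hlne hconst, pv_headD_const l "alt" hlne hconst]
        simp [hlne, hr, ha]
      · -- neither → informative empty, flags false
        have hlnil : l = [] := by
          rw [hl, List.filter_eq_nil_iff]
          intro a hmem
          simp
          constructor
          · intro h; exact hr (h ▸ hmem)
          · intro h; exact ha (h ▸ hmem)
        simp [hlnil, hr, ha]
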